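-- pv_equiv track=rewrite | github.com/TayTT/signify | src/AnalyzeMissingData.py | _find_missing_periods
-- ===== SOURCE A (Python) =====
-- from typing import Dict, List, Tuple, Any
--
-- def _find_missing_periods(missing_status_list: List[bool]) -> List[Dict]:
--     """Find contiguous periods of missing data"""
--     periods = []
--     in_missing_period = False
--     period_start = 0
--
--     for i, is_missing in enumerate(missing_status_list):
--         if is_missing and not in_missing_period:
--             # Start of missing period
--             period_start = i
--             in_missing_period = True
--         elif not is_missing and in_missing_period:
--             # End of missing period
--             period_length = i - period_start
--             periods.append({
--                 "start_frame": period_start,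
--                 "end_frame": i - 1,
--                 "length": period_length
--             })
--             in_missing_period = False
--
--     # Handle period that goes to the end
--     if in_missing_period:
--         period_length = len(missing_status_list) - period_start
--         periods.append({
--             "start_frame": period_start,
--             "end_frame": len(missing_status_list) - 1,
--             "length": period_length
--         })
--
--     return periods
-- ===== SOURCE B (Python) =====
-- def _find_missing_periods(missing_status_list):
--     """Find contiguous periods of missing data via boundary detection:
--     a run starts where True follows False (or the list start) and ends where
--     True precedes False (or the list end); pair the boundaries up with zip."""
--     xs = missing_status_list
--     starts = [i for i, (c, p) in enumerate(zip(xs, [False] + xs)) if c and not p]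
--     ends = [i for i, (c, nx) in enumerate(zip(xs, xs[1:] + [False])) if c and not nx]
--     return [{"start_frame": s, "end_frame": e, "length": e - s + 1}
--             for s, e in zip(starts, ends)]
-- ===== Notes on version B (the rewrite author's own statement) =====
-- stated objective: alternative
-- what changed: Replaces A's single-pass state machine (in_missing_period flag plus trailing branch) with boundary detection: two staged passes comparing the list with its shifted copies collect run starts and run ends, which are then paired with zip.
import Mathlib
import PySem

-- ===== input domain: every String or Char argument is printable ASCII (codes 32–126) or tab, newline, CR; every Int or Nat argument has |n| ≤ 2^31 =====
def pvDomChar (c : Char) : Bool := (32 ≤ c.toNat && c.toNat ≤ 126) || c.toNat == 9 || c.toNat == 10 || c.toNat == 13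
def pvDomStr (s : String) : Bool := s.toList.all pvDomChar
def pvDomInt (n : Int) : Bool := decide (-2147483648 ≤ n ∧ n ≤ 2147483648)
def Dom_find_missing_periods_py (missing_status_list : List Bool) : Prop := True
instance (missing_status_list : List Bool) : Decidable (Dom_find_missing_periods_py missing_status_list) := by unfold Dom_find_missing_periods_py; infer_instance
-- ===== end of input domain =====

-- B replaces A's single-pass state machine with staged boundary detection: run starts
-- and run ends are found by zipping the list with its shifted copies, then paired (objective: alternative).

-- ===== PORT A =====
def pvMkRec (s e l : Int) : List (String × Int) :=
  [("start_frame", s), ("end_frame", e), ("length", l)]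
def pvAGo (i period_start : Int) (inp : Bool) (periods : List (List (String × Int))) :
    List Bool → List (List (String × Int))
  | [] => if inp then periods ++ [pvMkRec period_start (i - 1) (i - period_start)] else periods
  | is_missing :: rest =>
      if is_missing && !inp then
        pvAGo (i + 1) i true periods rest
      else if !is_missing && inp then
        pvAGo (i + 1) period_start false
          (periods ++ [pvMkRec period_start (i - 1) (i - period_start)]) rest
      else
        pvAGo (i + 1) period_start inp periods rest

def find_missing_periods_py (missing_status_list : List Bool) : List (List (String × Int)) :=
  pvAGo 0 0 false [] missing_status_list

-- ===== PORT B =====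
def find_missing_periods_py_alt (missing_status_list : List Bool) : List (List (String × Int)) :=
  let xs := missing_status_list
  let starts := ((PySem.List.enumerate (List.zip xs (false :: xs)) 0).filter
      (fun p => p.2.1 && !p.2.2)).map (·.1)
  let ends := ((PySem.List.enumerate
      (List.zip xs (PySem.List.slice xs (some 1) none ++ [false])) 0).filter
      (fun p => p.2.1 && !p.2.2)).map (·.1)
  (List.zip starts ends).map (fun p => pvMkRec p.1 p.2 (p.2 - p.1 + 1))

-- ===== PRECONDITION & SPEC =====
def Spec_find_missing_periods_py (missing_status_list : List Bool) (out : List (List (String × Int))) : Prop := out = find_missing_periods_py_alt missing_status_list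
instance (missing_status_list : List Bool) (out : List (List (String × Int))) : Decidable (Spec_find_missing_periods_py missing_status_list out) := by unfold Spec_find_missing_periods_py; infer_instance

-- ===== CLAIM (what is proved, stated in full; the proofs are below) =====
def Claim_equal_find_missing_periods_py : Prop := ∀ (missing_status_list : List Bool), Dom_find_missing_periods_py missing_status_list → Spec_find_missing_periods_py missing_status_list (find_missing_periods_py missing_status_list)

-- ===== LEMMAS AND PROOFS =====
-- Recursive characterizations of B's two boundary passes.
def pvS (prev : Bool) (i : Int) : List Bool → List Int
  | [] => []
  | x :: r => if x && !prev then i :: pvS x (i + 1) r else pvS x (i + 1) r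

def pvE (i : Int) : List Bool → List Int
  | [] => []
  | [x] => if x then [i] else []
  | x :: y :: r => if x && !y then i :: pvE (i + 1) (y :: r) else pvE (i + 1) (y :: r)

-- ends of remaining runs when a run is currently open just before index i
def pvEo (i : Int) : List Bool → List Int
  | [] => [i - 1]
  | false :: r => (i - 1) :: pvE (i + 1) r
  | true :: r => pvEo (i + 1) r

def pvZM (ss es : List Int) : List (List (String × Int)) :=
  (List.zip ss es).map (fun p => pvMkRec p.1 p.2 (p.2 - p.1 + 1))

theorem pvStarts_eq (xs : List Bool) : ∀ (prev : Bool) (i : Int),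
    ((PySem.List.enumerate (List.zip xs (prev :: xs)) i).filter
      (fun p => p.2.1 && !p.2.2)).map (·.1) = pvS prev i xs := by
  induction xs with
  | nil => intro prev i; simp [pvS, PySem.List.enumerate_nil]
  | cons x r ih =>
    intro prev i
    simp only [List.zip_cons_cons, PySem.List.enumerate_cons, List.filter_cons, pvS]
    by_cases h : x && !prev <;> simp [h, ih x (i + 1)]

theorem pvEnds_eq (xs : List Bool) : ∀ (i : Int),
    ((PySem.List.enumerate (List.zip xs (xs.tail ++ [false])) i).filter
      (fun p => p.2.1 && !p.2.2)).map (·.1) = pvE i xs := by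
  induction xs with
  | nil => intro i; simp [pvE, PySem.List.enumerate_nil]
  | cons x r ih =>
    intro i
    match r with
    | [] =>
      cases x <;> simp [pvE, PySem.List.enumerate_cons, PySem.List.enumerate_nil]
    | y :: r' =>
      simp only [List.tail_cons] at ih ⊢
      have := ih (i + 1)
      simp only [List.cons_append, List.zip_cons_cons, PySem.List.enumerate_cons,
        List.filter_cons, pvE]
      by_cases h : x && !y <;> simp [h, this]

theorem pvE_false (r : List Bool) (i : Int) : pvE i (false :: r) = pvE (i + 1) r := by
  match r with
  | [] => simp [pvE]
  | z :: r' => simp [pvE]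

theorem pvEo_true (r : List Bool) : ∀ (i : Int), pvEo (i + 1) r = pvE i (true :: r) := by
  induction r with
  | nil => intro i; simp [pvEo, pvE]
  | cons y r' ih =>
    intro i
    cases y with
    | false => simp [pvEo, pvE, pvE_false]
    | true =>
      have := ih (i + 1)
      simp only [pvEo, pvE]
      simpa using this

theorem pvAGo_acc (xs : List Bool) : ∀ (i s : Int) (inp : Bool) (acc : List (List (String × Int))),
    pvAGo i s inp acc xs = acc ++ pvAGo i s inp [] xs := by
  induction xs with
  | nil => intro i s inp acc; cases inp <;> simp [pvAGo]
  | cons x rest ih =>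
    intro i s inp acc
    cases x <;> cases inp <;> simp only [pvAGo] <;> norm_num <;>
      rw [ih] <;> try (rw [ih (acc := [pvMkRec s (i-1) (i-s)])]; simp)

theorem pvMain (xs : List Bool) : ∀ (i s : Int),
    (pvAGo i s false [] xs = pvZM (pvS false i xs) (pvE i xs)) ∧
    (pvAGo i s true [] xs = pvZM (s :: pvS true i xs) (pvEo i xs)) := by
  induction xs with
  | nil =>
    intro i s
    constructor
    · simp [pvAGo, pvS, pvE, pvZM]
    · simp [pvAGo, pvS, pvEo, pvZM, pvMkRec]
      ring_nf
  | cons x r ih =>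
    intro i s
    cases x with
    | false =>
      constructor
      · simp only [pvAGo]
        norm_num
        rw [(ih (i + 1) s).1, pvS, pvE_false]
        simp
      · simp only [pvAGo]
        norm_num
        rw [pvAGo_acc, (ih (i + 1) s).1]
        simp only [pvS, pvEo, pvZM, List.zip_cons_cons, List.map_cons]
        simp [pvMkRec]
        ring_nf
    | true =>
      constructor
      · simp only [pvAGo]
        norm_num
        rw [(ih (i + 1) i).2]
        simp only [pvS, pvEo]
        rw [pvEo_true]
        simp
      · simp only [pvAGo]
        norm_num
        rw [(ih (i + 1) s).2]
        simp only [pvS, pvEo]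
        simp

-- ===== VERDICT (by name: the statement is the Claim_ definition above) =====
theorem find_missing_periods_py_spec : Claim_equal_find_missing_periods_py := by
  intro xs _
  unfold Spec_find_missing_periods_py find_missing_periods_py find_missing_periods_py_alt
  simp only [PySem.List.slice_from_one, pvStarts_eq, pvEnds_eq]
  exact (pvMain xs 0 0).1
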